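-- pv_equiv track=rewrite | github.com/khvorov45/VESimulation | UI/utilities.py | wrap_string
-- ===== SOURCE A (Python) =====
-- def wrap_string(phrase):
--     """Inserts newline characters after some underscores in a long string"""
--     und_indeces = []
--     for ind, char in enumerate(phrase):
--         if char == "_":
--             und_indeces.append(ind)
--     def cond(ind):
--         if ind < 10:
--             return False
--         if (ind % 15 not in range(0, 4)) and (ind % 15 not in range(12, 15)):
--             return False
--         return True
--     und_indeces = [ind for ind in und_indeces if cond(ind)]
--     phrase_list = list(phrase)
--     for cnt, ind in enumerate(und_indeces):
--         phrase_list.insert(ind + 1 + cnt, "\n")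
--     phrase = "".join(phrase_list)
--     return phrase
-- ===== SOURCE B (Python) =====
-- def wrap_string(phrase):
--     """Inserts newline characters after some underscores in a long string"""
--     def cond(ind):
--         if ind < 10:
--             return False
--         if (ind % 15 not in range(0, 4)) and (ind % 15 not in range(12, 15)):
--             return False
--         return True
--     out = []
--     for ind, char in enumerate(phrase):
--         out.append(char)
--         if char == "_" and cond(ind):
--             out.append("\n")
--     return "".join(out)
-- ===== Notes on version B (the rewrite author's own statement) =====
-- stated objective: simpler
-- what changed: Replaces the three-stage pipeline (collect underscore indices, filter, offset-shifted list.insert calls) with a single forward pass that appends each character and a newline right after each qualifying underscore.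
import Mathlib
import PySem

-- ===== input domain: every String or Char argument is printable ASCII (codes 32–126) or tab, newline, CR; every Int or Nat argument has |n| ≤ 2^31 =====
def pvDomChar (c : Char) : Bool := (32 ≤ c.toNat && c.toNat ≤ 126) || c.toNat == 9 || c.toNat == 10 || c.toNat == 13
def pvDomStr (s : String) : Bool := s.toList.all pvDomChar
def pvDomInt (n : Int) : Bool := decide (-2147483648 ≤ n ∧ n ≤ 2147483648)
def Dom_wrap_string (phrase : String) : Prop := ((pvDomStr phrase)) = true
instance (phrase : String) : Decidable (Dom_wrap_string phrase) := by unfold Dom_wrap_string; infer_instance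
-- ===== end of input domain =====

-- B replaces A's three-stage pipeline (collect underscore indices, filter them, offset-shifted
-- list.insert calls) by a single forward pass that emits each character and a newline right after
-- each qualifying underscore; objective: simpler.

-- ===== PORT A =====
-- the nested helper `cond`, shared verbatim by both Pythons
def pyCond (ind : Int) : Bool :=
  if ind < 10 then false
  else if !((PySem.List.pyRange 0 4 1).contains (PySem.Int.mod ind 15))
          && !((PySem.List.pyRange 12 15 1).contains (PySem.Int.mod ind 15)) then false
  else true

def wrap_string (phrase : String) : String :=
  let und_indeces := (PySem.List.enumerate phrase.toList 0).foldl
      (fun acc q => if q.2 == '_' then acc ++ [q.1] else acc) ([] : List Int)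
  let und_indeces := und_indeces.filter (fun i => pyCond i)
  let phrase_list := phrase.toList
  let phrase_list := (PySem.List.enumerate und_indeces 0).foldl
      (fun l q => PySem.List.insert l (q.2 + 1 + q.1) '\n') phrase_list
  String.ofList phrase_list

-- ===== PORT B =====
def wrap_string_alt (phrase : String) : String :=
  let out := (PySem.List.enumerate phrase.toList 0).foldl
      (fun acc q =>
        let acc := acc ++ [q.2]
        if q.2 == '_' && pyCond q.1 then acc ++ ['\n'] else acc) ([] : List Char)
  String.ofList out

-- ===== PRECONDITION & SPEC =====
def Spec_wrap_string (phrase : String) (out : String) : Prop := out = wrap_string_alt phrase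
instance (phrase : String) (out : String) : Decidable (Spec_wrap_string phrase out) := by unfold Spec_wrap_string; infer_instance

-- ===== CLAIM (what is proved, stated in full; the proofs are below) =====
def Claim_equal_wrap_string : Prop := ∀ (phrase : String), Dom_wrap_string phrase → Spec_wrap_string phrase (wrap_string phrase)

-- ===== LEMMAS AND PROOFS =====

-- the common reference computation: one structural pass over the characters, index carried along
def pvStream (cs : List Char) (s : Int) : List Char :=
  match cs with
  | [] => []
  | c :: cs => if c == '_' && pyCond s then c :: '\n' :: pvStream cs (s + 1)
               else c :: pvStream cs (s + 1)

-- the filtered underscore indices of A, computed structurally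
def pvIdxs (cs : List Char) (s : Int) : List Int :=
  match cs with
  | [] => []
  | c :: cs => if c == '_' && pyCond s then s :: pvIdxs cs (s + 1) else pvIdxs cs (s + 1)

-- A's insert loop with explicit counter `cnt` and a shift `o` subtracted from every position
def pvInsP (is : List Int) (cnt o : Int) (l : List Char) : List Char :=
  match is with
  | [] => l
  | i :: is => pvInsP is (cnt + 1) o (PySem.List.insert l (i + 1 + cnt - o) '\n')

theorem pv_ins_cons (x v : Char) (l : List Char) (n : Int) (h : 1 ≤ n) :
    PySem.List.insert (x :: l) n v = x :: PySem.List.insert l (n - 1) v := by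
  simp only [PySem.List.insert, PySem.List.sliceIndices]
  split_ifs with h1 h2 h3 <;> try omega
  have e : (min n ((l.length : Int) + 1)).toNat = (min (n - 1) (l.length : Int)).toNat + 1 := by omega
  simp [e]

theorem pvIdxs_ge (cs : List Char) (s : Int) : ∀ i ∈ pvIdxs cs s, s ≤ i := by
  induction cs generalizing s with
  | nil => simp [pvIdxs]
  | cons c cs ih =>
    intro i hi
    simp only [pvIdxs] at hi
    split at hi
    · rcases List.mem_cons.mp hi with h | h
      · omega
      · have := ih (s + 1) i h; omega
    · have := ih (s + 1) i hi; omega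

-- peeling one fixed head off the list being inserted into
theorem pvInsP_cons (is : List Int) (cnt o : Int) (x : Char) (l : List Char)
    (h : ∀ i ∈ is, o + 1 ≤ i + 1 + cnt) :
    pvInsP is cnt o (x :: l) = x :: pvInsP is cnt (o + 1) l := by
  induction is generalizing cnt l with
  | nil => rfl
  | cons i is ih =>
    have h1 : 1 ≤ i + 1 + cnt - o := by have := h i (List.mem_cons_self ..); omega
    simp only [pvInsP, pv_ins_cons x '\n' l _ h1]
    have e : i + 1 + cnt - o - 1 = i + 1 + cnt - (o + 1) := by omega
    rw [e, ih]
    intro j hj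
    have := h j (List.mem_cons_of_mem _ hj); omega

-- the heart: A's offset inserts on the filtered indices are the single streaming pass
theorem pvInsP_idxs (cs : List Char) (s cnt : Int) :
    pvInsP (pvIdxs cs s) cnt (s + cnt) cs = pvStream cs s := by
  induction cs generalizing s cnt with
  | nil => rfl
  | cons c cs ih =>
    simp only [pvIdxs, pvStream]
    split
    · simp only [pvInsP]
      have e1 : s + 1 + cnt - (s + cnt) = 1 := by omega
      rw [e1, pv_ins_cons c '\n' cs 1 (by omega)]
      norm_num [PySem.List.insert_zero]
      have hge := pvIdxs_ge cs (s + 1)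
      rw [pvInsP_cons _ _ _ _ _ (by intro i hi; have := hge i hi; omega),
          pvInsP_cons _ _ _ _ _ (by intro i hi; have := hge i hi; omega)]
      have e2 : s + cnt + 1 + 1 = (s + 1) + (cnt + 1) := by omega
      rw [e2, ih]
    · have hge := pvIdxs_ge cs (s + 1)
      rw [pvInsP_cons _ _ _ _ _ (by intro i hi; have := hge i hi; omega)]
      have e2 : s + cnt + 1 = (s + 1) + cnt := by omega
      rw [e2, ih]

-- A's first two stages produce exactly pvIdxs
theorem pv_filter_eq_idxs (cs : List Char) (s : Int) :
    (((PySem.List.enumerate cs s).filter (fun q => q.2 == '_')).map Prod.fst).filter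
      (fun i => pyCond i) = pvIdxs cs s := by
  induction cs generalizing s with
  | nil => simp [PySem.List.enumerate_nil, pvIdxs]
  | cons c cs ih =>
    rw [PySem.List.enumerate_cons]
    simp only [pvIdxs, List.filter_cons]
    by_cases hu : c == '_' <;> by_cases hc : pyCond s <;>
      simp [hu, hc, ih]

-- A's insert fold over the enumerated index list is pvInsP with shift 0
theorem pv_foldl_insert (is : List Int) (k : Int) (l : List Char) :
    (PySem.List.enumerate is k).foldl
      (fun l q => PySem.List.insert l (q.2 + 1 + q.1) '\n') l = pvInsP is k 0 l := by
  induction is generalizing k l with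
  | nil => rfl
  | cons i is ih =>
    rw [PySem.List.enumerate_cons]
    simp only [List.foldl_cons, pvInsP, ih]
    have e : i + 1 + k = i + 1 + k - 0 := by omega
    rw [← e]

-- B's fold is the streaming pass
theorem pv_alt_eq_stream (cs : List Char) (s : Int) (acc : List Char) :
    (PySem.List.enumerate cs s).foldl
      (fun acc q =>
        let acc := acc ++ [q.2]
        if q.2 == '_' && pyCond q.1 then acc ++ ['\n'] else acc) acc
      = acc ++ pvStream cs s := by
  induction cs generalizing s acc with
  | nil => simp [PySem.List.enumerate_nil, pvStream]
  | cons c cs ih =>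
    rw [PySem.List.enumerate_cons, List.foldl_cons, ih]
    by_cases h : c == '_' && pyCond s <;> simp [pvStream, h]

-- ===== VERDICT (by name: the statement is the Claim_ definition above) =====
theorem wrap_string_spec : Claim_equal_wrap_string := by
  intro phrase _
  unfold Spec_wrap_string wrap_string wrap_string_alt
  simp only [PySem.List.foldl_append_if (fun q : Int × Char => q.2 == '_') Prod.fst,
    List.nil_append, pv_filter_eq_idxs, pv_foldl_insert, pv_alt_eq_stream, List.nil_append]
  have := pvInsP_idxs phrase.toList 0 0
  simp only [zero_add] at this
  rw [this]
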